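-- pv_equiv track=rewrite | github.com/meeadi/Harmonique | utils/music_theory.py | get_seventh_chords
-- ===== SOURCE A (Python) =====
-- MAJOR_SCALE = [0, 2, 4, 5, 7, 9, 11]
--
-- MINOR_SCALE = [0, 2, 3, 5, 7, 8, 10]
--
-- def build_scales(root: int, scale_type: str) -> list:
--     if scale_type == 'major':
--         intervals = MAJOR_SCALE
--     elif scale_type == 'minor':
--         intervals = MINOR_SCALE
--     else:
--         raise ValueError(f"Unsupported scale type: {scale_type}")
--
--     return [(root + i) % 12 for i in intervals]
--
-- def get_seventh_chords(key_root: int, scale_type: str='major') -> list: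
--     scale = build_scales(key_root, scale_type)
--     seventh_chords = []
--
--     for i in range(7):
--         root = scale[i]
--         third = scale[(i + 2) % 7]
--         fifth = scale[(i + 4) % 7]
--         seventh = scale[(i + 6) % 7]
--         chord = [root % 12, third % 12, fifth % 12, seventh % 12]
--         seventh_chords.append(chord)
--
--     return seventh_chords
-- ===== SOURCE B (Python) =====
-- MAJOR_SCALE = [0, 2, 4, 5, 7, 9, 11]
--
-- MINOR_SCALE = [0, 2, 3, 5, 7, 8, 10]
--
-- def build_scales(root: int, scale_type: str) -> list:
--     if scale_type == 'major':
--         intervals = MAJOR_SCALE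
--     elif scale_type == 'minor':
--         intervals = MINOR_SCALE
--     else:
--         raise ValueError(f"Unsupported scale type: {scale_type}")
--
--     return [(root + i) % 12 for i in intervals]
--
-- def get_seventh_chords(key_root: int, scale_type: str='major') -> list:
--     scale = build_scales(key_root, scale_type)
--     extended = scale + scale  # two octaves laid end to end
--     # stacked thirds: every other note starting at degree i, four of them
--     return [extended[i:i + 8:2] for i in range(7)]
-- ===== Notes on version B (the rewrite author's own statement) =====
-- stated objective: simpler
-- what changed: B builds a doubled two-octave scale and takes a stride-2 slice extended[i:i+8:2] per degree, replacing the explicit (i+2)%7/(i+4)%7/(i+6)%7 lookups and the redundant %12 on each chord tone.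
import Mathlib
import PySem

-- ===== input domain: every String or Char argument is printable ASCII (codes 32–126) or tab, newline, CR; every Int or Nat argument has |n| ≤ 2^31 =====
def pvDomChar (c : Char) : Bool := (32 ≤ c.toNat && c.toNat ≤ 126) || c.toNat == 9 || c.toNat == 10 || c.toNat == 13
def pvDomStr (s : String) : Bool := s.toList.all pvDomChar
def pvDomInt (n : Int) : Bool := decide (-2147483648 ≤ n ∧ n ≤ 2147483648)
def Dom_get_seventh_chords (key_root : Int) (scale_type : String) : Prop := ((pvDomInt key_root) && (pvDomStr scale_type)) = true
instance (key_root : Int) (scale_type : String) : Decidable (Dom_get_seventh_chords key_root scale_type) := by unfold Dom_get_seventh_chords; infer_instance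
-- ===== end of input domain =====

-- B replaces the modular degree lookups and redundant %12 by one stride-2 slice of a doubled scale per degree (simpler; same cost).

-- ===== PORT A =====
def MAJOR_SCALE : List Int := [0, 2, 4, 5, 7, 9, 11]
def MINOR_SCALE : List Int := [0, 2, 3, 5, 7, 8, 10]

-- build_scales; returns none where the Python raises ValueError
def build_scales (root : Int) (scale_type : String) : Option (List Int) :=
  if scale_type = "major" then some (MAJOR_SCALE.map (fun i => PySem.Int.mod (root + i) 12))
  else if scale_type = "minor" then some (MINOR_SCALE.map (fun i => PySem.Int.mod (root + i) 12))
  else none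

def get_seventh_chords (key_root : Int) (scale_type : String) : List (List Int) :=
  match build_scales key_root scale_type with
  | none => []   -- unreachable under Pre_ (Python raises ValueError here)
  | some scale =>
    (PySem.List.pyRange 0 7 1).foldl (fun seventh_chords i =>
      let root := (PySem.List.pyGet? scale i).getD 0               -- scale[i]; i ∈ 0..6, always in range
      let third := (PySem.List.pyGet? scale (PySem.Int.mod (i + 2) 7)).getD 0
      let fifth := (PySem.List.pyGet? scale (PySem.Int.mod (i + 4) 7)).getD 0
      let seventh := (PySem.List.pyGet? scale (PySem.Int.mod (i + 6) 7)).getD 0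
      seventh_chords ++ [[PySem.Int.mod root 12, PySem.Int.mod third 12,
                          PySem.Int.mod fifth 12, PySem.Int.mod seventh 12]]) []

-- ===== PORT B =====
def get_seventh_chords_alt (key_root : Int) (scale_type : String) : List (List Int) :=
  match build_scales key_root scale_type with
  | none => []   -- unreachable under Pre_
  | some scale =>
    let extended := scale ++ scale
    (PySem.List.pyRange 0 7 1).map (fun i =>
      (PySem.List.slice? extended (some i) (some (i + 8)) 2).getD [])  -- step 2 ≠ 0, never none

-- ===== PRECONDITION & SPEC =====
-- Pre_ excludes exactly the scale types on which build_scales raises ValueError in Python.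
def Pre_get_seventh_chords (key_root : Int) (scale_type : String) : Prop :=
  scale_type = "major" ∨ scale_type = "minor"
instance (key_root : Int) (scale_type : String) : Decidable (Pre_get_seventh_chords key_root scale_type) := by unfold Pre_get_seventh_chords; infer_instance

def pvWitness_get_seventh_chords : Int × String := (0, "major")

def Spec_get_seventh_chords (key_root : Int) (scale_type : String) (out : List (List Int)) : Prop := out = get_seventh_chords_alt key_root scale_type
instance (key_root : Int) (scale_type : String) (out : List (List Int)) : Decidable (Spec_get_seventh_chords key_root scale_type out) := by unfold Spec_get_seventh_chords; infer_instance

-- ===== CLAIM (what is proved, stated in full; the proofs are below) =====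
def Claim_equal_get_seventh_chords : Prop := ∀ (key_root : Int) (scale_type : String), Dom_get_seventh_chords key_root scale_type → Pre_get_seventh_chords key_root scale_type → Spec_get_seventh_chords key_root scale_type (get_seventh_chords key_root scale_type)

-- ===== LEMMAS AND PROOFS =====

-- ===== VERDICT (by name: the statement is the Claim_ definition above) =====
theorem get_seventh_chords_spec : Claim_equal_get_seventh_chords := by
  intro key_root scale_type _ hpre
  unfold Spec_get_seventh_chords get_seventh_chords get_seventh_chords_alt build_scales
  rcases hpre with h | h <;> subst h <;>
    simp [MAJOR_SCALE, MINOR_SCALE, PySem.List.pyRange, List.range_succ,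
          PySem.List.pyGet?, PySem.List.pyIdx?, PySem.List.slice?, PySem.List.sliceIndices,
          PySem.Int.mod]
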